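-- pv_equiv track=rewrite | github.com/sawaiyutaka/data_extraction | oct/a5_faz_noise_mask.py | apply_noise_mask
-- ===== SOURCE A (Python) =====
-- from typing import Dict, List, Tuple
--
-- TARGETS = {
--     "L_Center": ["L_Area", "L_Perimeter", "L_Circularity", "L_AxisRatio"],
--     "R_Center": ["R_Area", "R_Perimeter", "R_Circularity", "R_AxisRatio"],
-- }
--
-- def index_by_id(rows: List[Dict[str, str]]) -> Dict[str, Dict[str, str]]:
--     return {r.get("ID", "").strip(): r for r in rows if r.get("ID", "").strip()}
--
-- def is_noise(val: str) -> bool: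
--     v = (val or "").strip()
--     return v == "1" or v == "１"
--
-- def apply_noise_mask(merged_rows: List[Dict[str, str]], noise_rows: List[Dict[str, str]]) -> int:
--     by_id = index_by_id(merged_rows)
--     masked_cells = 0
--
--     for n in noise_rows:
--         pid = (n.get("ID", "") or "").strip()
--         if not pid or pid not in by_id:
--             continue
--
--         tgt_row = by_id[pid]
--
--         for key, targets in TARGETS.items():
--             if key in n and is_noise(n[key]):
--                 for col in targets:
--                     if col in tgt_row and tgt_row[col] != "":
--                         tgt_row[col] = ""
--                         masked_cells += 1
--
--     return masked_cells
-- ===== SOURCE B (Python) =====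
-- TARGETS = {
--     "L_Center": ["L_Area", "L_Perimeter", "L_Circularity", "L_AxisRatio"],
--     "R_Center": ["R_Area", "R_Perimeter", "R_Circularity", "R_AxisRatio"],
-- }
--
--
-- def is_noise(val):
--     v = (val or "").strip()
--     return v == "1" or v == "１"
--
--
-- def apply_noise_mask(merged_rows, noise_rows):
--     # pass 1: union of flagged TARGETS keys per noise ID
--     flagged = {}
--     for n in noise_rows:
--         pid = (n.get("ID", "") or "").strip()
--         if not pid:
--             continue
--         hits = [k for k in TARGETS if is_noise(n.get(k, ""))]
--         if hits:
--             flagged.setdefault(pid, set()).update(hits)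
--     # pass 2: one sweep over the merged index, masking flagged groups
--     by_id = {r.get("ID", "").strip(): r for r in merged_rows if r.get("ID", "").strip()}
--     masked = 0
--     for pid, row in by_id.items():
--         keys = flagged.get(pid)
--         if not keys:
--             continue
--         for key, cols in TARGETS.items():
--             if key in keys:
--                 for col in cols:
--                     if row.get(col, "") != "":
--                         row[col] = ""
--                         masked += 1
--     return masked
-- ===== Notes on version B (the rewrite author's own statement) =====
-- stated objective: alternative
-- what changed: Replaces A's single interleaved loop over noise rows (which mutates the merged index while counting) by two separate passes: first build a dict mapping each noise ID to the union of its flagged TARGETS keys, then one sweep over the merged index that applies the mask and counts.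
import Mathlib
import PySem

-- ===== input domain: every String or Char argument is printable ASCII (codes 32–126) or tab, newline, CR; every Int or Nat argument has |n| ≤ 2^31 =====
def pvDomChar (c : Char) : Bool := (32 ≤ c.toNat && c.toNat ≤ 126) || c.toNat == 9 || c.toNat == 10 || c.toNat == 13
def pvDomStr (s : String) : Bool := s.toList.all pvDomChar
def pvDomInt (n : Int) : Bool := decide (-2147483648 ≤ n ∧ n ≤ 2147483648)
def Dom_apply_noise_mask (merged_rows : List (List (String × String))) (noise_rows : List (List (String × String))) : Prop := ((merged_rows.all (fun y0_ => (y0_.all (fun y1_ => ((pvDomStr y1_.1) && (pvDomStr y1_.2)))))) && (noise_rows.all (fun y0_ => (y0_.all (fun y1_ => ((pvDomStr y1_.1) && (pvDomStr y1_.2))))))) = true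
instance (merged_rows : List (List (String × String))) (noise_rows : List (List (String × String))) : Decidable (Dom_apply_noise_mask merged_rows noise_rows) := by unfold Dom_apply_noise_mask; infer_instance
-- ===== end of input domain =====

-- B replaces A's interleaved mask-while-scanning-noise loop by two passes (flag-union dict, then one
-- sweep over the merged index); equivalence is about the RETURN value only — both Pythons also blank
-- the same cells of the merged row dicts in place.

-- ===== PORT A =====
def pvTargetsA : List (String × List String) :=
  [("L_Center", ["L_Area", "L_Perimeter", "L_Circularity", "L_AxisRatio"]),
   ("R_Center", ["R_Area", "R_Perimeter", "R_Circularity", "R_AxisRatio"])]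

def pvIsNoiseA (val : String) : Bool :=
  let v := PySem.Str.strip val
  v == "1" || v == "１"

-- (n.get("ID", "") or "").strip(): the `or ""` only replaces the falsy "" by itself
def pvIdA (r : List (String × String)) : String :=
  PySem.Str.strip ((PySem.Dict.mk r).getD "ID" "")

def pvIndexByIdA (rows : List (List (String × String))) :
    PySem.Dict String (PySem.Dict String String) :=
  rows.foldl (fun d r =>
    let pid := pvIdA r
    if pid ≠ "" then d.insert pid (PySem.Dict.mk r) else d) PySem.Dict.empty

def pvStepColA (st : PySem.Dict String String × Int) (col : String) :
    PySem.Dict String String × Int :=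
  if st.1.contains col && (st.1.getD col "" != "") then (st.1.insert col "", st.2 + 1) else st

def pvStepKeyA (nd : PySem.Dict String String) (st : PySem.Dict String String × Int)
    (kt : String × List String) : PySem.Dict String String × Int :=
  if nd.contains kt.1 && pvIsNoiseA (nd.getD kt.1 "") then kt.2.foldl pvStepColA st else st

def pvStepRowA (st : PySem.Dict String (PySem.Dict String String) × Int)
    (n : List (String × String)) : PySem.Dict String (PySem.Dict String String) × Int :=
  let pid := pvIdA n
  if pid == "" || !st.1.contains pid then st
  else
    let inner := pvTargetsA.foldl (pvStepKeyA (PySem.Dict.mk n))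
      (st.1.getD pid PySem.Dict.empty, st.2)
    (st.1.insert pid inner.1, inner.2)

def apply_noise_mask (merged_rows : List (List (String × String))) (noise_rows : List (List (String × String))) : Int :=
  (noise_rows.foldl pvStepRowA (pvIndexByIdA merged_rows, 0)).2

-- ===== PORT B =====
def pvTargetsB : List (String × List String) :=
  [("L_Center", ["L_Area", "L_Perimeter", "L_Circularity", "L_AxisRatio"]),
   ("R_Center", ["R_Area", "R_Perimeter", "R_Circularity", "R_AxisRatio"])]

def pvIsNoiseB (val : String) : Bool :=
  let v := PySem.Str.strip val
  v == "1" || v == "１"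

def pvIdB (r : List (String × String)) : String :=
  PySem.Str.strip ((PySem.Dict.mk r).getD "ID" "")

-- pass 1: flagged = {noise ID ↦ union of TARGETS keys whose cell is noise}
def pvStepFlag (d : PySem.Dict String (PySem.Set String)) (n : List (String × String)) :
    PySem.Dict String (PySem.Set String) :=
  let pid := pvIdB n
  if pid = "" then d
  else
    let hits := (pvTargetsB.map (·.1)).filter
      (fun k => pvIsNoiseB ((PySem.Dict.mk n).getD k ""))
    if hits.isEmpty then d
    else d.modify pid [] (fun s => PySem.Set.update s hits)

def pvStepColB (st : PySem.Dict String String × Int) (col : String) :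
    PySem.Dict String String × Int :=
  if st.1.getD col "" != "" then (st.1.insert col "", st.2 + 1) else st

def pvStepKeyB (keys : PySem.Set String) (st : PySem.Dict String String × Int)
    (kt : String × List String) : PySem.Dict String String × Int :=
  if keys.contains kt.1 then kt.2.foldl pvStepColB st else st

-- pass 2: one sweep over the merged index
def pvRowB (flagged : PySem.Dict String (PySem.Set String)) (acc : Int)
    (pr : String × PySem.Dict String String) : Int :=
  match flagged.get? pr.1 with
  | none => acc
  | some keys =>
    if keys.isEmpty then acc
    else (pvTargetsB.foldl (pvStepKeyB keys) (pr.2, acc)).2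

def apply_noise_mask_alt (merged_rows : List (List (String × String))) (noise_rows : List (List (String × String))) : Int :=
  let flagged := noise_rows.foldl pvStepFlag PySem.Dict.empty
  let by_id := merged_rows.foldl (fun d r =>
    let pid := pvIdB r
    if pid ≠ "" then d.insert pid (PySem.Dict.mk r) else d) PySem.Dict.empty
  by_id.items.foldl (pvRowB flagged) 0

-- ===== PRECONDITION & SPEC =====
def Spec_apply_noise_mask (merged_rows : List (List (String × String))) (noise_rows : List (List (String × String))) (out : Int) : Prop := out = apply_noise_mask_alt merged_rows noise_rows
instance (merged_rows : List (List (String × String))) (noise_rows : List (List (String × String))) (out : Int) : Decidable (Spec_apply_noise_mask merged_rows noise_rows out) := by unfold Spec_apply_noise_mask; infer_instance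

-- ===== CLAIM (what is proved, stated in full; the proofs are below) =====
def Claim_equal_apply_noise_mask : Prop := ∀ (merged_rows : List (List (String × String))) (noise_rows : List (List (String × String))), Dom_apply_noise_mask merged_rows noise_rows → Spec_apply_noise_mask merged_rows noise_rows (apply_noise_mask merged_rows noise_rows)

-- ===== LEMMAS AND PROOFS =====

-- target column lists, named for the proofs
def pvTgL : List String := ["L_Area", "L_Perimeter", "L_Circularity", "L_AxisRatio"]
def pvTgR : List String := ["R_Area", "R_Perimeter", "R_Circularity", "R_AxisRatio"]

-- "some noise row has this id and flags this TARGETS key"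
def pvFk (noise : List (List (String × String))) (pid key : String) : Bool :=
  noise.any (fun n => (pvIdA n == pid) && pvIsNoiseA ((PySem.Dict.mk n).getD key ""))

-- number of non-empty cells of `row` among `cols`
def pvCnt (row : PySem.Dict String String) (cols : List String) : Int :=
  ((cols.countP (fun c => row.getD c "" != "")) : Int)

-- cells masked for one merged entry over the whole noise list
def pvContrib (noise : List (List (String × String))) (pid : String)
    (row : PySem.Dict String String) : Int :=
  (if pvFk noise pid "L_Center" then pvCnt row pvTgL else 0) +
  (if pvFk noise pid "R_Center" then pvCnt row pvTgR else 0)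

def pvF (l : List (String × PySem.Dict String String))
    (noise : List (List (String × String))) : Int :=
  (l.map (fun p => pvContrib noise p.1 p.2)).sum

-- the two-key mask/count kernel both inner loops reduce to
def pvInner (bL bR : Bool) (st : PySem.Dict String String × Int) :
    PySem.Dict String String × Int :=
  let st1 := if bL then pvTgL.foldl pvStepColB st else st
  if bR then pvTgR.foldl pvStepColB st1 else st1

lemma pvIdB_eq : pvIdB = pvIdA := rfl

lemma pvIsNoiseB_eq : pvIsNoiseB = pvIsNoiseA := rfl

lemma pvStepColA_eq : pvStepColA = pvStepColB := by
  funext st col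
  unfold pvStepColA pvStepColB
  rcases h : st.1.get? col with _ | v
  · rw [PySem.Dict.contains_eq_isSome_get?, h, PySem.Dict.getD_of_get?_eq_none _ _ h]
    simp
  · rw [PySem.Dict.contains_eq_isSome_get?, h]
    simp

lemma pvKeyCondA (nd : PySem.Dict String String) (k : String) :
    (nd.contains k && pvIsNoiseA (nd.getD k "")) = pvIsNoiseA (nd.getD k "") := by
  rcases h : nd.get? k with _ | v
  · rw [PySem.Dict.contains_eq_isSome_get?, h, PySem.Dict.getD_of_get?_eq_none _ _ h]
    have : pvIsNoiseA "" = false := by decide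
    simp [this]
  · rw [PySem.Dict.contains_eq_isSome_get?, h]
    simp

lemma pvMask_getD (cols : List String) : ∀ (st : PySem.Dict String String × Int) (c : String),
    (cols.foldl pvStepColB st).1.getD c ""
      = if cols.contains c then "" else st.1.getD c "" := by
  induction cols with
  | nil => intro st c; simp
  | cons c0 rest ih =>
    intro st c
    simp only [List.foldl_cons, pvStepColB, List.contains_cons]
    by_cases h0 : st.1.getD c0 "" = ""
    · rw [if_neg (by simp [h0])]
      rw [ih]
      by_cases hc : c = c0
      · subst hc
        simp [h0]
      · simp [beq_eq_false_iff_ne.mpr hc]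
    · rw [if_pos (by simp [h0])]
      rw [ih]
      simp only [PySem.Dict.getD_insert]
      by_cases hc : c = c0
      · subst hc
        simp
      · simp [beq_eq_false_iff_ne.mpr hc, hc]

lemma pvMask_snd : ∀ (cols : List String), cols.Nodup →
    ∀ (st : PySem.Dict String String × Int),
    (cols.foldl pvStepColB st).2
      = st.2 + ((cols.countP (fun c => st.1.getD c "" != "")) : Int) := by
  intro cols
  induction cols with
  | nil => intro _ st; simp
  | cons c0 rest ih =>
    intro hnd st
    obtain ⟨h0, hrest⟩ := List.nodup_cons.mp hnd
    simp only [List.foldl_cons, pvStepColB, List.countP_cons]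
    by_cases hv : st.1.getD c0 "" = ""
    · rw [if_neg (by simp [hv])]
      rw [ih hrest st]
      simp [hv]
    · rw [if_pos (by simp [hv])]
      rw [ih hrest]
      have hcong : (rest.countP fun c => (st.1.insert c0 "").getD c "" != "")
          = rest.countP fun c => st.1.getD c "" != "" := by
        apply List.countP_congr
        intro c hc
        have : c ≠ c0 := fun h => h0 (h ▸ hc)
        simp [PySem.Dict.getD_insert, this]
      simp only [hcong]
      rw [if_pos (by simp [hv])]
      push_cast
      ring

lemma pvInnerA_eq (nd : PySem.Dict String String) (st : PySem.Dict String String × Int) :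
    pvTargetsA.foldl (pvStepKeyA nd) st
      = pvInner (pvIsNoiseA (nd.getD "L_Center" "")) (pvIsNoiseA (nd.getD "R_Center" "")) st := by
  rw [show pvTargetsA = [("L_Center", pvTgL), ("R_Center", pvTgR)] from rfl,
    List.foldl_cons, List.foldl_cons, List.foldl_nil]
  unfold pvStepKeyA
  dsimp only
  rw [pvKeyCondA, pvKeyCondA, pvStepColA_eq]
  rfl

lemma pvInnerB_eq (keys : PySem.Set String) (st : PySem.Dict String String × Int) :
    pvTargetsB.foldl (pvStepKeyB keys) st
      = pvInner (keys.contains "L_Center") (keys.contains "R_Center") st := by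
  rw [show pvTargetsB = [("L_Center", pvTgL), ("R_Center", pvTgR)] from rfl,
    List.foldl_cons, List.foldl_cons, List.foldl_nil]
  unfold pvStepKeyB
  dsimp only
  rfl

lemma pvInner_ff (st : PySem.Dict String String × Int) : pvInner false false st = st := by
  simp [pvInner]

lemma pvInner_ft (st : PySem.Dict String String × Int) :
    pvInner false true st = pvTgR.foldl pvStepColB st := by
  simp [pvInner]

lemma pvInner_tf (st : PySem.Dict String String × Int) :
    pvInner true false st = pvTgL.foldl pvStepColB st := by
  simp [pvInner]

lemma pvInner_tt (st : PySem.Dict String String × Int) :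
    pvInner true true st = pvTgR.foldl pvStepColB (pvTgL.foldl pvStepColB st) := by
  simp [pvInner]

lemma pvInner_snd (bL bR : Bool) (row : PySem.Dict String String) (acc : Int) :
    (pvInner bL bR (row, acc)).2
      = acc + (if bL then pvCnt row pvTgL else 0) + (if bR then pvCnt row pvTgR else 0) := by
  have hL : pvTgL.Nodup := by decide
  have hR : pvTgR.Nodup := by decide
  have hdisj : ∀ c ∈ pvTgR, pvTgL.contains c = false := by decide
  unfold pvCnt
  cases bL <;> cases bR
  · rw [pvInner_ff]; simp
  · rw [pvInner_ft, pvMask_snd _ hR]; simp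
  · rw [pvInner_tf, pvMask_snd _ hL]; simp
  · rw [pvInner_tt, pvMask_snd _ hR, pvMask_snd _ hL]
    have hcong : (pvTgR.countP fun c => (pvTgL.foldl pvStepColB (row, acc)).1.getD c "" != "")
        = pvTgR.countP fun c => row.getD c "" != "" := by
      apply List.countP_congr
      intro c hc
      rw [pvMask_getD, hdisj c hc]
      simp
    rw [hcong]
    simp
    try ring

lemma pvInner_getD (bL bR : Bool) (st : PySem.Dict String String × Int) (c : String) :
    (pvInner bL bR st).1.getD c ""
      = if (bL && pvTgL.contains c) || (bR && pvTgR.contains c) then "" else st.1.getD c "" := by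
  cases bL <;> cases bR <;>
    simp only [pvInner_ff, pvInner_ft, pvInner_tf, pvInner_tt, Bool.false_and, Bool.true_and,
      Bool.false_or, Bool.or_false, Bool.or_self, pvMask_getD] <;>
    split_ifs <;> simp_all

lemma pvCnt_inner_L (bL bR : Bool) (st : PySem.Dict String String × Int) :
    pvCnt (pvInner bL bR st).1 pvTgL = if bL then 0 else pvCnt st.1 pvTgL := by
  have hmemL : ∀ c ∈ pvTgL, pvTgL.contains c = true := by decide
  have hdisj : ∀ c ∈ pvTgL, pvTgR.contains c = false := by decide
  unfold pvCnt
  cases bL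
  · simp only [Bool.false_eq_true, if_false]
    congr 1
    apply List.countP_congr
    intro c hc
    rw [pvInner_getD, hmemL c hc, hdisj c hc]
    simp
  · simp only [if_true]
    have : (pvTgL.countP fun c => (pvInner true bR st).1.getD c "" != "") = 0 := by
      rw [List.countP_eq_zero]
      intro c hc
      rw [pvInner_getD, hmemL c hc]
      simp
    rw [this]
    rfl

lemma pvCnt_inner_R (bL bR : Bool) (st : PySem.Dict String String × Int) :
    pvCnt (pvInner bL bR st).1 pvTgR = if bR then 0 else pvCnt st.1 pvTgR := by
  have hmemR : ∀ c ∈ pvTgR, pvTgR.contains c = true := by decide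
  have hdisj : ∀ c ∈ pvTgR, pvTgL.contains c = false := by decide
  unfold pvCnt
  cases bR
  · simp only [Bool.false_eq_true, if_false]
    congr 1
    apply List.countP_congr
    intro c hc
    rw [pvInner_getD, hmemR c hc, hdisj c hc]
    simp
  · simp only [if_true]
    have : (pvTgR.countP fun c => (pvInner bL true st).1.getD c "" != "") = 0 := by
      rw [List.countP_eq_zero]
      intro c hc
      rw [pvInner_getD, hmemR c hc]
      simp
    rw [this]
    rfl

lemma pvFk_cons (n : List (String × String)) (rest : List (List (String × String)))
    (pid k : String) :
    pvFk (n :: rest) pid k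
      = (((pvIdA n == pid) && pvIsNoiseA ((PySem.Dict.mk n).getD k "")) || pvFk rest pid k) := by
  simp [pvFk]

lemma pvContrib_cons_hit (n : List (String × String)) (rest : List (List (String × String)))
    (row : PySem.Dict String String) (acc : Int) :
    pvContrib (n :: rest) (pvIdA n) row
      = ((pvInner (pvIsNoiseA ((PySem.Dict.mk n).getD "L_Center" ""))
            (pvIsNoiseA ((PySem.Dict.mk n).getD "R_Center" "")) (row, acc)).2 - acc)
        + pvContrib rest (pvIdA n)
            (pvInner (pvIsNoiseA ((PySem.Dict.mk n).getD "L_Center" ""))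
              (pvIsNoiseA ((PySem.Dict.mk n).getD "R_Center" "")) (row, acc)).1 := by
  unfold pvContrib
  rw [pvInner_snd, pvCnt_inner_L, pvCnt_inner_R, pvFk_cons, pvFk_cons]
  simp only [beq_self_eq_true, Bool.true_and]
  cases pvIsNoiseA ((PySem.Dict.mk n).getD "L_Center" "") <;>
    cases pvIsNoiseA ((PySem.Dict.mk n).getD "R_Center" "") <;>
    cases pvFk rest (pvIdA n) "L_Center" <;>
    cases pvFk rest (pvIdA n) "R_Center" <;>
    simp <;> ring

lemma pvContrib_cons_miss (n : List (String × String)) (rest : List (List (String × String)))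
    (pid : String) (row : PySem.Dict String String) (h : pvIdA n ≠ pid) :
    pvContrib (n :: rest) pid row = pvContrib rest pid row := by
  simp [pvContrib, pvFk_cons, beq_eq_false_iff_ne.mpr h]

lemma pvF_nil : ∀ (l : List (String × PySem.Dict String String)), pvF l [] = 0 := by
  intro l
  induction l with
  | nil => simp [pvF]
  | cons p t ih =>
    simp only [pvF, List.map_cons, List.sum_cons] at ih ⊢
    rw [ih]
    simp [pvContrib, pvFk]

lemma pvF_cons_skip (n : List (String × String)) (rest : List (List (String × String))) :
    ∀ (l : List (String × PySem.Dict String String)), (∀ p ∈ l, pvIdA n ≠ p.1) →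
    pvF l (n :: rest) = pvF l rest := by
  intro l
  induction l with
  | nil => intro _; rfl
  | cons p t ih =>
    intro h
    simp only [pvF, List.map_cons, List.sum_cons] at ih ⊢
    rw [pvContrib_cons_miss _ _ _ _ (h p (by simp))]
    rw [ih (fun q hq => h q (by simp [hq]))]

lemma pvF_cons_hit (n : List (String × String)) (rest : List (List (String × String)))
    (row0 : PySem.Dict String String) (acc : Int) :
    ∀ (l : List (String × PySem.Dict String String)),
    (∀ p ∈ l, p.1 = pvIdA n → p.2 = row0) → (l.map (·.1)).Nodup → pvIdA n ∈ l.map (·.1) →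
    pvF l (n :: rest)
      = ((pvInner (pvIsNoiseA ((PySem.Dict.mk n).getD "L_Center" ""))
            (pvIsNoiseA ((PySem.Dict.mk n).getD "R_Center" "")) (row0, acc)).2 - acc)
        + pvF (l.map (fun p => if p.1 == pvIdA n then
            (pvIdA n, (pvInner (pvIsNoiseA ((PySem.Dict.mk n).getD "L_Center" ""))
              (pvIsNoiseA ((PySem.Dict.mk n).getD "R_Center" "")) (row0, acc)).1) else p)) rest := by
  intro l
  induction l with
  | nil => intro _ _ hmem; simp at hmem
  | cons p t ih =>
    intro hval hnd hmem
    simp only [List.map_cons, List.nodup_cons] at hnd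
    obtain ⟨hp1, hnd'⟩ := hnd
    by_cases hp : p.1 = pvIdA n
    · have hrow : p.2 = row0 := hval p (by simp) hp
      have hnotin : pvIdA n ∉ t.map (·.1) := by rw [← hp]; exact hp1
      have hskip : ∀ q ∈ t, pvIdA n ≠ q.1 := by
        intro q hq h'
        exact hnotin (by rw [h']; exact List.mem_map_of_mem hq)
      have ht : pvF t (n :: rest) = pvF t rest := pvF_cons_skip n rest t hskip
      have hmapid : (t.map (fun q => if q.1 == pvIdA n then
          (pvIdA n, (pvInner (pvIsNoiseA ((PySem.Dict.mk n).getD "L_Center" ""))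
            (pvIsNoiseA ((PySem.Dict.mk n).getD "R_Center" "")) (row0, acc)).1) else q)) = t := by
        have hid : ∀ q ∈ t, (if q.1 == pvIdA n then
            (pvIdA n, (pvInner (pvIsNoiseA ((PySem.Dict.mk n).getD "L_Center" ""))
              (pvIsNoiseA ((PySem.Dict.mk n).getD "R_Center" "")) (row0, acc)).1) else q) = q := by
          intro q hq
          have hb : (q.1 == pvIdA n) = false := by
            rw [beq_eq_false_iff_ne]
            exact fun h' => hskip q hq h'.symm
          rw [hb]
          simp
        exact (List.map_congr_left (g := id) hid).trans (List.map_id t)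
      simp only [pvF, List.map_cons, List.sum_cons] at ht ⊢
      rw [hrow, hp, pvContrib_cons_hit n rest row0 acc, ht, hmapid]
      have hbt : (pvIdA n == pvIdA n) = true := by simp
      rw [if_pos hbt]
      dsimp only
      ring
    · have hpne : pvIdA n ≠ p.1 := fun h => hp h.symm
      have hmem' : pvIdA n ∈ t.map (·.1) := by
        rcases List.mem_cons.mp hmem with h' | h'
        · exact absurd h'.symm hp
        · exact h'
      have hval' : ∀ q ∈ t, q.1 = pvIdA n → q.2 = row0 :=
        fun q hq h' => hval q (by simp [hq]) h'
      simp only [pvF, List.map_cons, List.sum_cons] at ih ⊢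
      rw [pvContrib_cons_miss _ _ _ _ hpne, ih hval' hnd' hmem',
        if_neg (by simp only [beq_iff_eq]; exact hp)]
      ring

lemma pvIndex_inv (rows : List (List (String × String))) :
    ∀ (d : PySem.Dict String (PySem.Dict String String)), d.keys.Nodup → "" ∉ d.keys →
    (rows.foldl (fun d r => let pid := pvIdA r;
        if pid ≠ "" then d.insert pid (PySem.Dict.mk r) else d) d).keys.Nodup ∧
    "" ∉ (rows.foldl (fun d r => let pid := pvIdA r;
        if pid ≠ "" then d.insert pid (PySem.Dict.mk r) else d) d).keys := by
  induction rows with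
  | nil => intro d h1 h2; exact ⟨h1, h2⟩
  | cons r t ih =>
    intro d h1 h2
    simp only [List.foldl_cons]
    by_cases hp : pvIdA r ≠ ""
    · simp only [if_pos hp]
      apply ih
      · by_cases hc : d.contains (pvIdA r) = true
        · rw [PySem.Dict.keys_insert_of_contains _ _ hc]; exact h1
        · have hc' : d.contains (pvIdA r) = false := by
            revert hc; cases d.contains (pvIdA r) <;> simp
          rw [PySem.Dict.keys_insert_of_not_contains _ _ hc']
          have hnm : pvIdA r ∉ d.keys := by
            intro hm
            exact absurd ((PySem.Dict.contains_iff_mem_keys _ _).mpr hm)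
              (by simp [hc'])
          simp [List.nodup_append, h1]
          intro a ha h'
          exact hnm (h' ▸ ha)
      · by_cases hc : d.contains (pvIdA r) = true
        · rw [PySem.Dict.keys_insert_of_contains _ _ hc]; exact h2
        · have hc' : d.contains (pvIdA r) = false := by
            revert hc; cases d.contains (pvIdA r) <;> simp
          rw [PySem.Dict.keys_insert_of_not_contains _ _ hc']
          simp only [List.mem_append, List.mem_singleton]
          rintro (h' | h')
          · exact h2 h'
          · exact hp h'.symm
    · simp only [if_neg hp]
      exact ih d h1 h2

lemma pvLoopA (noise : List (List (String × String))) :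
    ∀ (byId : PySem.Dict String (PySem.Dict String String)) (cnt : Int),
    byId.keys.Nodup → "" ∉ byId.keys →
    (noise.foldl pvStepRowA (byId, cnt)).2 = cnt + pvF byId.items noise := by
  induction noise with
  | nil => intro byId cnt _ _; simp [pvF_nil]
  | cons n rest ih =>
    intro byId cnt h1 h2
    simp only [List.foldl_cons]
    by_cases hg : (pvIdA n == "" || !byId.contains (pvIdA n)) = true
    · have hstep : pvStepRowA (byId, cnt) n = (byId, cnt) := by
        unfold pvStepRowA
        rw [if_pos hg]
      rw [hstep, ih byId cnt h1 h2]
      congr 1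
      apply (pvF_cons_skip n rest _ _).symm
      intro p hp heq
      have hpk := PySem.Dict.mem_keys_of_mem_items _ hp
      rcases Bool.or_eq_true_iff.mp hg with h' | h'
      · have : pvIdA n = "" := beq_iff_eq.mp h'
        rw [← heq, this] at hpk
        exact h2 hpk
      · have : byId.contains (pvIdA n) = false := by
          revert h'; cases byId.contains (pvIdA n) <;> simp
        rw [← heq] at hpk
        exact absurd ((PySem.Dict.contains_iff_mem_keys _ _).mpr hpk) (by simp [this])
    · have hcont : byId.contains (pvIdA n) = true := by
        revert hg; cases byId.contains (pvIdA n) <;> simp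
      have hstep : pvStepRowA (byId, cnt) n
          = (byId.insert (pvIdA n)
              (pvInner (pvIsNoiseA ((PySem.Dict.mk n).getD "L_Center" ""))
                (pvIsNoiseA ((PySem.Dict.mk n).getD "R_Center" ""))
                (byId.getD (pvIdA n) PySem.Dict.empty, cnt)).1,
             (pvInner (pvIsNoiseA ((PySem.Dict.mk n).getD "L_Center" ""))
                (pvIsNoiseA ((PySem.Dict.mk n).getD "R_Center" ""))
                (byId.getD (pvIdA n) PySem.Dict.empty, cnt)).2) := by
        unfold pvStepRowA
        rw [if_neg hg, pvInnerA_eq]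
      rw [hstep]
      have hkeys := PySem.Dict.keys_insert_of_contains byId
        (pvInner (pvIsNoiseA ((PySem.Dict.mk n).getD "L_Center" ""))
          (pvIsNoiseA ((PySem.Dict.mk n).getD "R_Center" ""))
          (byId.getD (pvIdA n) PySem.Dict.empty, cnt)).1 hcont
      rw [ih _ _ (by rw [hkeys]; exact h1) (by rw [hkeys]; exact h2)]
      rw [PySem.Dict.items_insert_of_contains _ _ hcont]
      have hkeysdef : byId.keys = byId.items.map (·.1) := rfl
      have hval : ∀ p ∈ byId.items, p.1 = pvIdA n → p.2 = byId.getD (pvIdA n) PySem.Dict.empty := by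
        intro p hp h'
        have := PySem.Dict.getD_of_mem_items byId
          (show (p.1, p.2) ∈ byId.items by simpa using hp) h1 PySem.Dict.empty
        rw [h'] at this
        exact this.symm
      have hmem : pvIdA n ∈ byId.items.map (·.1) := by
        rw [← hkeysdef]
        exact (PySem.Dict.contains_iff_mem_keys _ _).mp hcont
      rw [pvF_cons_hit n rest (byId.getD (pvIdA n) PySem.Dict.empty) cnt byId.items hval
        (by rw [← hkeysdef]; exact h1) hmem]
      ring

lemma pvSetContainsUpdate (s : PySem.Set String) (xs : List String) (k : String) :
    (PySem.Set.update s xs).contains k = (s.contains k || xs.contains k) := by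
  rw [Bool.eq_iff_iff]
  simp only [Bool.or_eq_true, PySem.Set.contains_iff, PySem.Set.mem_update,
    List.contains_iff_mem]

-- the flagged-keys list pass 1 computes for one noise row
def pvHits (n : List (String × String)) : List String :=
  (pvTargetsB.map (·.1)).filter (fun k => pvIsNoiseA ((PySem.Dict.mk n).getD k ""))

lemma pvStepFlag_eq (d : PySem.Dict String (PySem.Set String)) (n : List (String × String)) :
    pvStepFlag d n =
      if pvIdA n = "" then d
      else if (pvHits n).isEmpty then d
      else d.modify (pvIdA n) [] (fun s => PySem.Set.update s (pvHits n)) := by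
  unfold pvStepFlag pvHits
  rw [pvIdB_eq, pvIsNoiseB_eq]

lemma pvFlag_char (noise : List (List (String × String))) :
    ∀ (d : PySem.Dict String (PySem.Set String)) (pid k : String), pid ≠ "" →
    (k = "L_Center" ∨ k = "R_Center") →
    ((noise.foldl pvStepFlag d).getD pid []).contains k
      = (((d.getD pid []).contains k) || pvFk noise pid k) := by
  induction noise with
  | nil => intro d pid k _ _; simp [pvFk]
  | cons n rest ih =>
    intro d pid k hpid hk
    rw [List.foldl_cons, pvFk_cons, pvStepFlag_eq]
    have hkTK : k ∈ pvTargetsB.map (·.1) := by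
      rcases hk with h | h <;> (subst h; decide)
    by_cases hn0 : pvIdA n = ""
    · rw [if_pos hn0, ih d pid k hpid hk]
      have hb : (pvIdA n == pid) = false :=
        beq_eq_false_iff_ne.mpr (by rw [hn0]; exact fun h => hpid h.symm)
      rw [hb]
      simp
    · rw [if_neg hn0]
      by_cases hemp : (pvHits n).isEmpty = true
      · rw [if_pos hemp, ih d pid k hpid hk]
        have hnil : pvHits n = [] := List.isEmpty_iff.mp hemp
        unfold pvHits at hnil
        have h' := List.filter_eq_nil_iff.mp hnil k hkTK
        have hnoise : pvIsNoiseA ((PySem.Dict.mk n).getD k "") = false := by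
          revert h'; cases pvIsNoiseA ((PySem.Dict.mk n).getD k "") <;> simp
        rw [hnoise]
        simp
      · rw [if_neg hemp]
        have hhk : (pvHits n).contains k = pvIsNoiseA ((PySem.Dict.mk n).getD k "") := by
          rw [Bool.eq_iff_iff, List.contains_iff_mem]
          unfold pvHits
          rw [List.mem_filter]
          exact ⟨fun h => h.2, fun h => ⟨hkTK, h⟩⟩
        by_cases hpp : pid = pvIdA n
        · rw [← hpp, ih _ pid k hpid hk, PySem.Dict.getD_modify_self,
            pvSetContainsUpdate, hhk, beq_self_eq_true]
          simp only [Bool.true_and, Bool.or_assoc]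
        · rw [ih _ pid k hpid hk, PySem.Dict.getD_modify_of_ne _ _ _ hpp]
          have hb : (pvIdA n == pid) = false :=
            beq_eq_false_iff_ne.mpr (fun h => hpp h.symm)
          rw [hb]
          simp

lemma pvRowsB (noise : List (List (String × String))) :
    ∀ (l : List (String × PySem.Dict String String)) (acc : Int), (∀ p ∈ l, p.1 ≠ "") →
    l.foldl (pvRowB (noise.foldl pvStepFlag PySem.Dict.empty)) acc = acc + pvF l noise := by
  intro l
  induction l with
  | nil => intro acc _; simp [pvF]
  | cons p t ih =>
    intro acc hne
    have hp1 : p.1 ≠ "" := hne p (by simp)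
    have hfk : ∀ k, (k = "L_Center" ∨ k = "R_Center") →
        ((noise.foldl pvStepFlag PySem.Dict.empty).getD p.1 []).contains k
          = pvFk noise p.1 k := by
      intro k hk
      rw [pvFlag_char noise PySem.Dict.empty p.1 k hp1 hk, PySem.Dict.getD_empty]
      rfl
    have hcontrib : pvRowB (noise.foldl pvStepFlag PySem.Dict.empty) acc p
        = acc + pvContrib noise p.1 p.2 := by
      rcases hget : (noise.foldl pvStepFlag PySem.Dict.empty).get? p.1 with _ | keys
      · have hd := PySem.Dict.getD_of_get?_eq_none _ ([] : PySem.Set String) hget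
        rw [hd] at hfk
        have hL : pvFk noise p.1 "L_Center" = false := by rw [← hfk _ (Or.inl rfl)]; rfl
        have hR : pvFk noise p.1 "R_Center" = false := by rw [← hfk _ (Or.inr rfl)]; rfl
        simp only [pvRowB, hget, pvContrib, hL, hR]
        simp
      · have hd := PySem.Dict.getD_of_get?_eq_some _ ([] : PySem.Set String) hget
        rw [hd] at hfk
        by_cases hemp : keys.isEmpty = true
        · have hkeys : keys = [] := List.isEmpty_iff.mp hemp
          subst hkeys
          have hL : pvFk noise p.1 "L_Center" = false := by rw [← hfk _ (Or.inl rfl)]; rfl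
          have hR : pvFk noise p.1 "R_Center" = false := by rw [← hfk _ (Or.inr rfl)]; rfl
          simp only [pvRowB, hget, pvContrib, hL, hR]
          simp
        · simp only [pvRowB, hget, if_neg hemp]
          rw [pvInnerB_eq, pvInner_snd, hfk _ (Or.inl rfl), hfk _ (Or.inr rfl)]
          unfold pvContrib
          ring
      -- the match in pvRowB must see hget
    simp only [List.foldl_cons]
    rw [hcontrib, ih _ (fun q hq => hne q (by simp [hq]))]
    simp only [pvF, List.map_cons, List.sum_cons]
    ring

-- ===== VERDICT (by name: the statement is the Claim_ definition above) =====
theorem apply_noise_mask_spec : Claim_equal_apply_noise_mask := by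
  intro merged_rows noise_rows _
  unfold Spec_apply_noise_mask
  obtain ⟨hnd, hne⟩ := pvIndex_inv merged_rows PySem.Dict.empty (by simp) (by simp)
  have hA : apply_noise_mask merged_rows noise_rows
      = 0 + pvF (pvIndexByIdA merged_rows).items noise_rows := by
    exact pvLoopA noise_rows _ 0 hnd hne
  have hB : apply_noise_mask_alt merged_rows noise_rows
      = 0 + pvF (pvIndexByIdA merged_rows).items noise_rows := by
    have : ∀ p ∈ (pvIndexByIdA merged_rows).items, p.1 ≠ "" := by
      intro p hp h
      have hk := PySem.Dict.mem_keys_of_mem_items _ hp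
      rw [h] at hk
      exact hne hk
    exact pvRowsB noise_rows _ 0 this
  rw [hA, hB]
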